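-- pv_equiv track=rewrite | github.com/karlwaldman/pain-point-discovery-engine | scripts/collect_firecrawl.py | extract_posts_from_markdown
-- ===== SOURCE A (Python) =====
-- def extract_posts_from_markdown(content, source_type):
--     """Extract individual posts from markdown content."""
--     posts = []
--
--     if source_type == 'hackernews':
--         # HN structure: Title, then comments
--         # Look for "Ask HN:" or "Show HN:" patterns
--         lines = content.split('\n')
--         current_post = None
--
--         for line in lines:
--             # Detect post titles (usually ## or ### headers)
--             if line.strip().startswith('#') and ('Ask HN' in line or 'Show HN' in line or 'Tell HN' in line):
--                 if current_post:
--                     posts.append(current_post)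
--
--                 title = line.strip('#').strip()
--                 current_post = {
--                     'title': title,
--                     'text': title,
--                     'source': 'hackernews'
--                 }
--             elif current_post:
--                 # Add to current post text
--                 current_post['text'] += '\n' + line
--
--         if current_post:
--             posts.append(current_post)
--
--     elif source_type == 'indiehackers':
--         # Similar structure - look for discussion topics
--         lines = content.split('\n')
--         current_post = None
--
--         for line in lines:
--             if line.strip().startswith('#'):
--                 if current_post:
--                     posts.append(current_post)
--
--                 title = line.strip('#').strip()
--                 current_post = {
--                     'title': title,
--                     'text': title,
--                     'source': 'indiehackers'
--                 }
--             elif current_post and line.strip():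
--                 current_post['text'] += '\n' + line
--
--         if current_post:
--             posts.append(current_post)
--
--     # If no structured posts found, treat whole content as one post
--     if not posts and content:
--         posts.append({
--             'title': 'Discussion',
--             'text': content[:500],  # First 500 chars
--             'source': source_type
--         })
--
--     return posts
-- ===== SOURCE B (Python) =====
-- def extract_posts_from_markdown(content, source_type):
--     """Extract individual posts from markdown content (group-then-map formulation)."""
--     if source_type == 'hackernews':
--         posts = _build_posts(content.split('\n'), _is_hn_header,
--                              lambda line: True, 'hackernews')
--     elif source_type == 'indiehackers':
--         posts = _build_posts(content.split('\n'),
--                              lambda line: line.strip().startswith('#'),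
--                              lambda line: bool(line.strip()), 'indiehackers')
--     else:
--         posts = []
--     if not posts and content:
--         posts = [{'title': 'Discussion', 'text': content[:500], 'source': source_type}]
--     return posts
--
--
-- def _is_hn_header(line):
--     return line.strip().startswith('#') and (
--         'Ask HN' in line or 'Show HN' in line or 'Tell HN' in line)
--
--
-- def _build_posts(lines, is_header, keep, source):
--     # Phase 1: group the lines into segments, one per header line
--     # (lines before the first header are dropped).
--     segments = []
--     for line in lines:
--         if is_header(line):
--             segments.append([line])
--         elif segments:
--             segments[-1].append(line)
--     # Phase 2: map each segment to a post.
--     posts = []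
--     for seg in segments:
--         title = seg[0].strip('#').strip()
--         body = [line for line in seg[1:] if keep(line)]
--         text = title + ''.join('\n' + line for line in body)
--         posts.append({'title': title, 'text': text, 'source': source})
--     return posts
-- ===== Notes on version B (the rewrite author's own statement) =====
-- stated objective: alternative
-- what changed: Replaces A's streaming current_post accumulator (dict mutated line by line with string +=, flushed at the next header and at the end) by a two-phase group-then-map: first group the lines into per-header segments, then map each segment to its post; the fallback 'Discussion' post is unchanged.
import Mathlib
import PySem

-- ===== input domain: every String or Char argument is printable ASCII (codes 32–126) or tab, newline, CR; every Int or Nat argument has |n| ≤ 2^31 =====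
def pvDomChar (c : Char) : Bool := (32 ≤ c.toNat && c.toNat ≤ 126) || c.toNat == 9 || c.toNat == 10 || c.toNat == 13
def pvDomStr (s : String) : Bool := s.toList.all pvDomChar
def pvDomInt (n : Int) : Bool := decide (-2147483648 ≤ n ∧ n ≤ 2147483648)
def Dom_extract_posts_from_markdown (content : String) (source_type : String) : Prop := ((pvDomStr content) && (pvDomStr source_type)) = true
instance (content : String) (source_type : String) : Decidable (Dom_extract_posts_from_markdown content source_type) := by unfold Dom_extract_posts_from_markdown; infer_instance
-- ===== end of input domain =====

-- B replaces A's streaming current_post accumulator with a group-into-segments-then-map decomposition (objective: alternative).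

-- shared small pieces (exactly the Python expressions both programs contain)
-- title = line.strip('#').strip()
def pvTitle (l : List Char) : List Char := PySem.Chars.strip (PySem.Chars.stripChars l ['#'])
-- line.strip().startswith('#') and ('Ask HN' in line or 'Show HN' in line or 'Tell HN' in line)
def pvHdrHN (l : List Char) : Bool :=
  PySem.Chars.startswith (PySem.Chars.strip l) ['#'] &&
    (PySem.Chars.isIn "Ask HN".toList l || PySem.Chars.isIn "Show HN".toList l || PySem.Chars.isIn "Tell HN".toList l)
-- line.strip().startswith('#')
def pvHdrIH (l : List Char) : Bool := PySem.Chars.startswith (PySem.Chars.strip l) ['#']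
-- truthiness of line.strip()
def pvKeepIH (l : List Char) : Bool := !(PySem.Chars.strip l).isEmpty
-- the post dict {'title': t, 'text': x, 'source': src} as an association list
def pvPost (src : String) (t x : List Char) : List (String × String) :=
  [("title", String.ofList t), ("text", String.ofList x), ("source", src)]

-- ===== PORT A =====
-- A's for-loop over lines with state (posts, current_post); keep = the 'and line.strip()' guard
-- of the indiehackers branch (constantly true in the hackernews branch, which has no guard).
def pvStepA (hdr keep : List Char → Bool) (src : String)
    (st : List (List (String × String)) × Option (List Char × List Char)) (l : List Char) :
    List (List (String × String)) × Option (List Char × List Char) :=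
  if hdr l then
    let posts := match st.2 with
      | none => st.1
      | some (t, x) => st.1 ++ [pvPost src t x]
    let t := pvTitle l
    (posts, some (t, t))
  else
    match st.2 with
    | some (t, x) => if keep l then (st.1, some (t, x ++ '\n' :: l)) else (st.1, some (t, x))
    | none => (st.1, none)

-- the trailing 'if current_post: posts.append(current_post)'
def pvFinishA (src : String) (st : List (List (String × String)) × Option (List Char × List Char)) :
    List (List (String × String)) :=
  match st.2 with
  | none => st.1
  | some (t, x) => st.1 ++ [pvPost src t x]

def pvRunA (hdr keep : List Char → Bool) (src : String) (lines : List (List Char)) :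
    List (List (String × String)) :=
  pvFinishA src (lines.foldl (pvStepA hdr keep src) ([], none))

def extract_posts_from_markdown (content : String) (source_type : String) : List (List (String × String)) :=
  let posts :=
    if source_type == "hackernews" then
      pvRunA pvHdrHN (fun _ => true) "hackernews" (PySem.Chars.splitOn content.toList ['\n'])
    else if source_type == "indiehackers" then
      pvRunA pvHdrIH pvKeepIH "indiehackers" (PySem.Chars.splitOn content.toList ['\n'])
    else []
  if posts.isEmpty && !content.toList.isEmpty then
    [[("title", "Discussion"), ("text", String.ofList (PySem.List.slice content.toList none (some 500))), ("source", source_type)]]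
  else posts

-- ===== PORT B =====
-- B (Source B): phase 1 groups the lines into per-header segments (segments[-1].append(line)
-- ported as pvAppendLast); phase 2 maps each segment to its post.
def pvAppendLast (segs : List (List (List Char))) (l : List Char) : List (List (List Char)) :=
  match segs with
  | [] => []
  | [s] => [s ++ [l]]
  | s :: rest => s :: pvAppendLast rest l

def pvStepB (hdr : List Char → Bool) (segs : List (List (List Char))) (l : List Char) :
    List (List (List Char)) :=
  if hdr l then segs ++ [[l]]
  else if segs.isEmpty then segs
  else pvAppendLast segs l

def pvMkPostB (keep : List Char → Bool) (src : String) (seg : List (List Char)) :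
    List (String × String) :=
  match seg with
  | [] => []  -- unreachable: every segment starts with its header line
  | h :: hs =>
    let t := pvTitle h
    pvPost src t (t ++ (hs.filter keep).flatMap (fun l => '\n' :: l))

def pvRunB (hdr keep : List Char → Bool) (src : String) (lines : List (List Char)) :
    List (List (String × String)) :=
  (lines.foldl (pvStepB hdr) []).map (pvMkPostB keep src)

def extract_posts_from_markdown_alt (content : String) (source_type : String) : List (List (String × String)) :=
  let posts :=
    if source_type == "hackernews" then
      pvRunB pvHdrHN (fun _ => true) "hackernews" (PySem.Chars.splitOn content.toList ['\n'])
    else if source_type == "indiehackers" then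
      pvRunB pvHdrIH pvKeepIH "indiehackers" (PySem.Chars.splitOn content.toList ['\n'])
    else []
  if posts.isEmpty && !content.toList.isEmpty then
    [[("title", "Discussion"), ("text", String.ofList (PySem.List.slice content.toList none (some 500))), ("source", source_type)]]
  else posts

-- ===== PRECONDITION & SPEC =====
def Spec_extract_posts_from_markdown (content : String) (source_type : String) (out : List (List (String × String))) : Prop := out = extract_posts_from_markdown_alt content source_type
instance (content : String) (source_type : String) (out : List (List (String × String))) : Decidable (Spec_extract_posts_from_markdown content source_type out) := by unfold Spec_extract_posts_from_markdown; infer_instance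

-- ===== CLAIM (what is proved, stated in full; the proofs are below) =====
def Claim_equal_extract_posts_from_markdown : Prop := ∀ (content : String) (source_type : String), Dom_extract_posts_from_markdown content source_type → Spec_extract_posts_from_markdown content source_type (extract_posts_from_markdown content source_type)

-- ===== LEMMAS AND PROOFS =====

lemma pvAppendLast_append (X : List (List (List Char))) (s : List (List Char)) (l : List Char) :
    pvAppendLast (X ++ [s]) l = X ++ [s ++ [l]] := by
  induction X with
  | nil => rfl
  | cons a X ih =>
    cases X with
    | nil => simp [pvAppendLast]
    | cons b Y => simpa [pvAppendLast] using ih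

-- folding pvStepB over a nonempty accumulator only touches its last segment: a prefix splits off
lemma pvFoldB_prefix (hdr : List Char → Bool) (ls : List (List Char)) :
    ∀ (X S : List (List (List Char))), S ≠ [] →
      ls.foldl (pvStepB hdr) (X ++ S) = X ++ ls.foldl (pvStepB hdr) S := by
  induction ls with
  | nil => intro X S _; simp
  | cons l ls ih =>
    intro X S hS
    simp only [List.foldl_cons]
    by_cases h : hdr l
    · have : pvStepB hdr (X ++ S) l = X ++ (pvStepB hdr S l) := by
        simp [pvStepB, h]
      rw [this, ih X _ (by simp [pvStepB, h])]
    · obtain ⟨Y, s, rfl⟩ := S.eq_nil_or_concat.resolve_left hS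
      simp only [List.concat_eq_append]
      have h1 : pvStepB hdr (X ++ (Y ++ [s])) l = X ++ pvStepB hdr (Y ++ [s]) l := by
        simp [pvStepB, h, ← List.append_assoc, pvAppendLast_append]
      rw [h1, ih X _ (by simp [pvStepB, h, pvAppendLast_append])]

-- the text A has accumulated for the open post with header h and body-so-far hs
def pvTextOf (keep : List Char → Bool) (h : List Char) (hs : List (List Char)) : List Char :=
  pvTitle h ++ (hs.filter keep).flatMap (fun l => '\n' :: l)

lemma pvRun_some (hdr keep : List Char → Bool) (src : String) (ls : List (List Char)) :
    ∀ (h : List Char) (hs : List (List Char)) (posts : List (List (String × String))),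
      pvFinishA src (ls.foldl (pvStepA hdr keep src) (posts, some (pvTitle h, pvTextOf keep h hs)))
        = posts ++ (ls.foldl (pvStepB hdr) [h :: hs]).map (pvMkPostB keep src) := by
  induction ls with
  | nil =>
    intro h hs posts
    simp [pvFinishA, pvMkPostB, pvTextOf]
  | cons l ls ih =>
    intro h hs posts
    simp only [List.foldl_cons]
    by_cases hl : hdr l
    · have hA : pvStepA hdr keep src (posts, some (pvTitle h, pvTextOf keep h hs)) l
          = (posts ++ [pvPost src (pvTitle h) (pvTextOf keep h hs)], some (pvTitle l, pvTitle l)) := by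
        simp [pvStepA, hl]
      have hB : pvStepB hdr [h :: hs] l = [h :: hs] ++ [[l]] := by simp [pvStepB, hl]
      rw [hA, hB, pvFoldB_prefix hdr ls [h :: hs] [[l]] (by simp),
        show (some (pvTitle l, pvTitle l) : Option (List Char × List Char))
            = some (pvTitle l, pvTextOf keep l []) by simp [pvTextOf],
        ih l [] (posts ++ [pvPost src (pvTitle h) (pvTextOf keep h hs)])]
      simp [pvMkPostB, pvTextOf]
    · have hB : pvStepB hdr [h :: hs] l = [h :: (hs ++ [l])] := by
        simp [pvStepB, hl, pvAppendLast]
      by_cases hk : keep l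
      · have hA : pvStepA hdr keep src (posts, some (pvTitle h, pvTextOf keep h hs)) l
            = (posts, some (pvTitle h, pvTextOf keep h (hs ++ [l]))) := by
          simp [pvStepA, hl, hk, pvTextOf, List.filter_append]
        rw [hA, hB, ih h (hs ++ [l]) posts]
      · have hA : pvStepA hdr keep src (posts, some (pvTitle h, pvTextOf keep h hs)) l
            = (posts, some (pvTitle h, pvTextOf keep h (hs ++ [l]))) := by
          simp [pvStepA, hl, hk, pvTextOf, List.filter_append]
        rw [hA, hB, ih h (hs ++ [l]) posts]

lemma pvRun_none (hdr keep : List Char → Bool) (src : String) (ls : List (List Char)) :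
    ∀ (posts : List (List (String × String))),
      pvFinishA src (ls.foldl (pvStepA hdr keep src) (posts, none))
        = posts ++ (ls.foldl (pvStepB hdr) []).map (pvMkPostB keep src) := by
  induction ls with
  | nil => intro posts; simp [pvFinishA]
  | cons l ls ih =>
    intro posts
    simp only [List.foldl_cons]
    by_cases hl : hdr l
    · have hA : pvStepA hdr keep src (posts, none) l = (posts, some (pvTitle l, pvTitle l)) := by
        simp [pvStepA, hl]
      have hB : pvStepB hdr [] l = [[l]] := by simp [pvStepB, hl]
      rw [hA, hB]
      have := pvRun_some hdr keep src ls l [] posts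
      simpa [pvTextOf] using this
    · have hA : pvStepA hdr keep src (posts, none) l = (posts, none) := by
        simp [pvStepA, hl]
      have hB : pvStepB hdr [] l = [] := by simp [pvStepB, hl]
      rw [hA, hB, ih]

lemma pvRun_eq (hdr keep : List Char → Bool) (src : String) (lines : List (List Char)) :
    pvRunA hdr keep src lines = pvRunB hdr keep src lines := by
  simpa using pvRun_none hdr keep src lines []

-- ===== VERDICT (by name: the statement is the Claim_ definition above) =====
theorem extract_posts_from_markdown_spec : Claim_equal_extract_posts_from_markdown := by
  intro content source_type _
  unfold Spec_extract_posts_from_markdown extract_posts_from_markdown extract_posts_from_markdown_alt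
  rw [pvRun_eq, pvRun_eq]
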